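-- pv_equiv track=rewrite | github.com/valch85/study-python-first-scripts | list_comprehension.py | myfunc2
-- ===== SOURCE A (Python) =====
-- def myfunc2(str):
--     result = []
--     for i,l in enumerate(str):
--         if i % 2 == 0:
--            result.append(l.lower())
--         else:
--             result.append(l.upper())
--     return "".join(result)
-- ===== SOURCE B (Python) =====
-- def myfunc2(str):
--     out = []
--     n = len(str)
--     i = 0
--     while i + 1 < n:
--         out.append(str[i].lower())
--         out.append(str[i + 1].upper())
--         i += 2
--     if i < n:
--         out.append(str[i].lower())
--     return "".join(out)
-- ===== Notes on version B (the rewrite author's own statement) =====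
-- stated objective: alternative
-- what changed: Replaces the per-index parity test (i % 2) inside an enumerate loop by a stride-2 loop that consumes characters two at a time (lowercase the first, uppercase the second) with a tail case for odd length, so no modulo or index-parity branch is evaluated.
import Mathlib
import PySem

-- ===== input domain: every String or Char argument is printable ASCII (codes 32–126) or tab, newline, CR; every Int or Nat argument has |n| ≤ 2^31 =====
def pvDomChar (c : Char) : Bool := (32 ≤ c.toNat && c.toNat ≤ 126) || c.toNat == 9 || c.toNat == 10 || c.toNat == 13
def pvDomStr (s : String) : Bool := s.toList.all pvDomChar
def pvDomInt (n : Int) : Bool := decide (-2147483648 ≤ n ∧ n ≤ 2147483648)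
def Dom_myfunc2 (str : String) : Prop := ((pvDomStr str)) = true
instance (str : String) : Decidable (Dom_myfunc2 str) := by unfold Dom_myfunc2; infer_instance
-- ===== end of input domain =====

-- B replaces A's per-index parity branch by a stride-2 pair loop (alternative decomposition, same cost).


-- ===== PORT A =====
-- for i,l in enumerate(str): append l.lower() if i % 2 == 0 else l.upper(); "".join(result)
def myfunc2 (str : String) : String :=
  let result : List Char :=
    (PySem.List.enumerate str.toList 0).foldl
      (fun acc p =>
        if PySem.Int.mod p.1 2 == 0 then acc ++ [PySem.Chars.lowerChar p.2]
        else acc ++ [PySem.Chars.upperChar p.2]) []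
  String.mk result

-- ===== PORT B =====
-- the while loop of Source B: consume two characters per step, tail case for odd length
def pvPairLoop : List Char → List Char
  | [] => []
  | [a] => [PySem.Chars.lowerChar a]
  | a :: b :: rest => PySem.Chars.lowerChar a :: PySem.Chars.upperChar b :: pvPairLoop rest

def myfunc2_alt (str : String) : String :=
  String.mk (pvPairLoop str.toList)

-- ===== PRECONDITION & SPEC =====
def Spec_myfunc2 (str : String) (out : String) : Prop := out = myfunc2_alt str
instance (str : String) (out : String) : Decidable (Spec_myfunc2 str out) := by unfold Spec_myfunc2; infer_instance

-- ===== CLAIM (what is proved, stated in full; the proofs are below) =====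
def Claim_equal_myfunc2 : Prop := ∀ (str : String), Dom_myfunc2 str → Spec_myfunc2 str (myfunc2 str)

-- ===== LEMMAS AND PROOFS =====

def pvStep (p : Int × Char) : Char :=
  if PySem.Int.mod p.1 2 == 0 then PySem.Chars.lowerChar p.2 else PySem.Chars.upperChar p.2

theorem pvmod2 (i : Int) : PySem.Int.mod i 2 = i % 2 := by
  simp [PySem.Int.mod, Int.fmod_eq_emod_of_nonneg]

theorem pvFold_eq_map (l : List (Int × Char)) (acc : List Char) :
    l.foldl (fun acc p =>
        if PySem.Int.mod p.1 2 == 0 then acc ++ [PySem.Chars.lowerChar p.2]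
        else acc ++ [PySem.Chars.upperChar p.2]) acc = acc ++ l.map pvStep := by
  induction l generalizing acc with
  | nil => simp
  | cons p t ih => simp only [List.foldl_cons, List.map_cons, pvStep]
                   rw [ih]; split_ifs <;> simp

theorem pvMap_enumerate_eq_pairLoop :
    ∀ (l : List Char) (i : Int), PySem.Int.mod i 2 = 0 →
      (PySem.List.enumerate l i).map pvStep = pvPairLoop l
  | [], _, _ => by simp [PySem.List.enumerate_nil, pvPairLoop]
  | [a], i, h => by
      rw [pvmod2] at h
      simp only [PySem.List.enumerate_cons, PySem.List.enumerate_nil, List.map_cons,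
        List.map_nil, pvPairLoop, pvStep, pvmod2]
      simp [h]
  | a :: b :: rest, i, h => by
      rw [pvmod2] at h
      have h1 : (i + 1) % 2 ≠ 0 := by omega
      have h2 : (i + 1 + 1) % 2 = 0 := by omega
      simp only [PySem.List.enumerate_cons, List.map_cons, pvPairLoop, pvStep, pvmod2]
      simp [h, h1, pvMap_enumerate_eq_pairLoop rest (i + 1 + 1) (by rw [pvmod2]; omega)]

-- ===== VERDICT (by name: the statement is the Claim_ definition above) =====
theorem myfunc2_spec : Claim_equal_myfunc2 := by
  intro str _
  unfold Spec_myfunc2 myfunc2 myfunc2_alt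
  rw [pvFold_eq_map, pvMap_enumerate_eq_pairLoop str.toList 0 (by decide)]
  simp
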